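-- pv_equiv track=rewrite | github.com/joelittyab-git/chess-new | dynamic.py | generate_chess_centers
-- ===== SOURCE A (Python) =====
-- def generate_chess_centers(square_size=64):
--     board = []
--
--     for row in range(8):
--         row_centers = []
--         for col in range(8):
--             center_x = col * square_size + square_size // 2
--             center_y = row * square_size + square_size // 2
--             row_centers.append((center_x, center_y))
--         board.append(row_centers)
--
--     return board
-- ===== SOURCE B (Python) =====
-- def generate_chess_centers(square_size=64):
--     # Build only the first row explicitly; every later row is the previous
--     # row translated down by square_size (incremental shifting, no per-cell
--     # multiplication after row 0).
--     half = square_size // 2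
--     row = [(col * square_size + half, half) for col in range(8)]
--     board = [row]
--     for _ in range(7):
--         row = [(x, y + square_size) for (x, y) in row]
--         board.append(row)
--     return board
-- ===== Notes on version B (the rewrite author's own statement) =====
-- stated objective: alternative
-- what changed: B computes only the first row with multiplications and derives each subsequent row by translating the previous row down by square_size with an accumulator, instead of recomputing both coordinates from scratch in every cell of a nested loop.
import Mathlib
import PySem

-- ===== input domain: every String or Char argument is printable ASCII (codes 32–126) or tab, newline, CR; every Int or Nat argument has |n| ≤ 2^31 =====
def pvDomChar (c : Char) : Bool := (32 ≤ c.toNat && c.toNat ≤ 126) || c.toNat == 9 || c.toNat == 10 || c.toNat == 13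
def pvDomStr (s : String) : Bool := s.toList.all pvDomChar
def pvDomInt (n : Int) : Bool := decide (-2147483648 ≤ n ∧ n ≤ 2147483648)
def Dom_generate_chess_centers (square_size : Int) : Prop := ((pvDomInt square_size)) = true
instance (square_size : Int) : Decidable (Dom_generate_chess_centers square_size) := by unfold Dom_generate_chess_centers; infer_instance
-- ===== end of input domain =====

-- B builds only the first row by multiplication and derives each later row by translating
-- the previous one down by square_size (objective: alternative decomposition).

-- ===== PORT A =====
-- literal transliteration of A's nested append loops over range(8)
def generate_chess_centers (square_size : Int) : List (List (Int × Int)) :=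
  (PySem.List.pyRange 0 8 1).foldl (fun board row =>
    let row_centers :=
      (PySem.List.pyRange 0 8 1).foldl (fun row_centers col =>
        let center_x := col * square_size + PySem.Int.floordiv square_size 2
        let center_y := row * square_size + PySem.Int.floordiv square_size 2
        row_centers ++ [(center_x, center_y)]) []
    board ++ [row_centers]) []

-- ===== PORT B =====
-- literal transliteration of Source B: first row explicit, later rows shifted by square_size
def generate_chess_centers_alt (square_size : Int) : List (List (Int × Int)) :=
  let half := PySem.Int.floordiv square_size 2
  let row := (PySem.List.pyRange 0 8 1).map (fun col => (col * square_size + half, half))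
  let st :=
    (PySem.List.pyRange 0 7 1).foldl (fun (st : List (Int × Int) × List (List (Int × Int))) _ =>
      let row := st.1.map (fun p => (p.1, p.2 + square_size))
      (row, st.2 ++ [row])) (row, [row])
  st.2

-- ===== PRECONDITION & SPEC =====
def Spec_generate_chess_centers (square_size : Int) (out : List (List (Int × Int))) : Prop := out = generate_chess_centers_alt square_size
instance (square_size : Int) (out : List (List (Int × Int))) : Decidable (Spec_generate_chess_centers square_size out) := by unfold Spec_generate_chess_centers; infer_instance

-- ===== CLAIM =====
def Claim_equal_generate_chess_centers : Prop := ∀ (square_size : Int), Dom_generate_chess_centers square_size → Spec_generate_chess_centers square_size (generate_chess_centers square_size)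

-- ===== LEMMAS AND PROOFS =====

-- ===== VERDICT =====
theorem generate_chess_centers_spec : Claim_equal_generate_chess_centers := by
  intro s _
  show generate_chess_centers s = generate_chess_centers_alt s
  simp [generate_chess_centers, generate_chess_centers_alt, PySem.List.pyRange,
    List.range_succ]
  ring_nf
  norm_num
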